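-- pv_equiv track=rewrite | github.com/cbehera-newrelic/support_analyser | java-agent-embed.py | prepare_text_for_embedding
-- ===== SOURCE A (Python) =====
-- def prepare_text_for_embedding(text):
--     """Prepare text for embedding by cleaning and truncating."""
--     # Clean the text
--     text = str(text).replace('\n', ' ').replace('\r', ' ').replace('\t', ' ')
--     text = ''.join(char for char in text if ord(char) < 128)
--     text = ' '.join(text.split())
--
--     # If text is too long, truncate it
--     if len(text) > 8000:
--         text = text[:8000]
--
--     # If text is empty after cleaning
--     if not text.strip():
--         return "empty_document"
--
--     return text
-- ===== SOURCE B (Python) =====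
-- def prepare_text_for_embedding(text):
--     """Single pass: keep ASCII chars, collapse/strip whitespace via a pending flag, truncate, fallback."""
--     out = []
--     pending = False
--     for ch in str(text):
--         if ord(ch) >= 128:
--             continue
--         if ch in ' \t\n\r\f\v':
--             pending = True
--         else:
--             if pending and out:
--                 out.append(' ')
--             out.append(ch)
--             pending = False
--     cleaned = ''.join(out[:8000])
--     return cleaned if cleaned else "empty_document"
-- ===== Notes on version B (the rewrite author's own statement) =====
-- stated objective: simpler
-- what changed: Replaced A's multi-pass pipeline (three str.replace passes, an ord-filter join, split()/join, conditional truncation) with one loop over the characters that keeps ASCII chars and collapses whitespace runs via a pending flag, then truncates unconditionally.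
import Mathlib
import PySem

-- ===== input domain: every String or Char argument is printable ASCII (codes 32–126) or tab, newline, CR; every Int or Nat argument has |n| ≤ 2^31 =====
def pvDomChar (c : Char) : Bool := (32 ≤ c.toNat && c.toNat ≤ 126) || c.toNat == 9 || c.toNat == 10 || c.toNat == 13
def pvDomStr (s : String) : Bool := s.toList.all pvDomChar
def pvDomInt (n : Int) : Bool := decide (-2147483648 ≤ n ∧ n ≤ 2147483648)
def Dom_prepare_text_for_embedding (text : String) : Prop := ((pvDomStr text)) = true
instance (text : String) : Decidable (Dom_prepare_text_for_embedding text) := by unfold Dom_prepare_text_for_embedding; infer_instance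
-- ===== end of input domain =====

-- B replaces A's multi-pass pipeline (three replaces, an ord filter, split/join) by a single
-- character loop with a pending-whitespace flag; objective: simpler (one pass).

-- ===== PORT A =====
def prepare_text_for_embedding (text : String) : String :=
  -- text = str(text).replace('\n',' ').replace('\r',' ').replace('\t',' ')
  let t1 := PySem.Str.replace (PySem.Str.replace (PySem.Str.replace text "\n" " ") "\r" " ") "\t" " "
  -- text = ''.join(char for char in text if ord(char) < 128)
  let t2 := String.ofList (t1.toList.filter (fun c => c.toNat < 128))
  -- text = ' '.join(text.split())
  let t3 := PySem.Str.join " " (PySem.Str.split₀ t2)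
  -- if len(text) > 8000: text = text[:8000]
  let t4 := if PySem.Str.len t3 > 8000 then PySem.Str.slice t3 none (some 8000) else t3
  -- if not text.strip(): return "empty_document"
  if PySem.Str.strip t4 = "" then "empty_document" else t4

-- ===== PORT B =====
-- ch in ' \t\n\r\f\v'
def pteB_isws (c : Char) : Bool :=
  c == ' ' || c == '\t' || c == '\n' || c == '\r' || c == '\x0c' || c == '\x0b'

-- the for-loop of Source B: state = (out, pending)
def pteB_go : List Char → List Char → Bool → List Char
  | [], out, _ => out
  | c :: rest, out, pending =>
    if 128 ≤ c.toNat then pteB_go rest out pending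
    else if pteB_isws c then pteB_go rest out true
    else pteB_go rest (if pending && !out.isEmpty then out ++ [' ', c] else out ++ [c]) false

def prepare_text_for_embedding_alt (text : String) : String :=
  let cleaned := String.ofList ((pteB_go text.toList [] false).take 8000)
  if cleaned = "" then "empty_document" else cleaned

-- ===== PRECONDITION & SPEC =====
def Spec_prepare_text_for_embedding (text : String) (out : String) : Prop := out = prepare_text_for_embedding_alt text
instance (text : String) (out : String) : Decidable (Spec_prepare_text_for_embedding text out) := by unfold Spec_prepare_text_for_embedding; infer_instance

-- ===== CLAIM (what is proved, stated in full; the proofs are below) =====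
def Claim_equal_prepare_text_for_embedding : Prop := ∀ (text : String), Dom_prepare_text_for_embedding text → Spec_prepare_text_for_embedding text (prepare_text_for_embedding text)

-- ===== LEMMAS AND PROOFS =====

-- the combined effect of the three replaces on one character
def pteNorm (c : Char) : Char := if c = '\n' ∨ c = '\r' ∨ c = '\t' then ' ' else c

lemma char_toNat_inj {c d : Char} (h : c.toNat = d.toNat) : c = d := by
  apply Char.ext
  exact UInt32.toNat_inj.mp h

-- single-character str.replace is a map
lemma replace_go_single (a b : Char) : ∀ (l acc : List Char) (fuel : Nat), l.length ≤ fuel →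
    PySem.Chars.replace.go [a] [b] fuel l acc
      = acc.reverse ++ l.map (fun c => if c = a then b else c) := by
  intro l
  induction l with
  | nil => intro acc fuel _; cases fuel <;> simp [PySem.Chars.replace.go]
  | cons c t ih =>
    intro acc fuel hf
    cases fuel with
    | zero => simp at hf
    | succ f =>
      by_cases hca : c = a
      · subst hca
        have hpre : [c].isPrefixOf (c :: t) = true := by simp [List.isPrefixOf]
        simp only [PySem.Chars.replace.go, hpre, if_true]
        have hd : List.drop [c].length (c :: t) = t := rfl
        have hb : [b].reverse ++ acc = b :: acc := rfl
        rw [hd, hb, ih (b :: acc) f (by simpa using hf)]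
        simp
      · have hpre : [a].isPrefixOf (c :: t) = false := by
          simp [List.isPrefixOf]
          intro h; exact absurd h.symm hca
        simp only [PySem.Chars.replace.go, hpre]
        rw [ih (c :: acc) f (by simpa using hf)]
        simp [hca]

lemma replace_single (a b : Char) (cs : List Char) :
    PySem.Chars.replace cs [a] [b] = cs.map (fun c => if c = a then b else c) := by
  simp only [PySem.Chars.replace, List.isEmpty_cons]
  rw [replace_go_single a b cs [] cs.length le_rfl]
  simp

lemma three_replaces (cs : List Char) :
    PySem.Chars.replace (PySem.Chars.replace (PySem.Chars.replace cs ['\n'] [' ']) ['\r'] [' ']) ['\t'] [' ']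
      = cs.map pteNorm := by
  rw [replace_single, replace_single, replace_single, List.map_map, List.map_map]
  apply List.map_congr_left
  intro c _
  simp only [Function.comp, pteNorm]
  split_ifs <;> simp_all <;> tauto

lemma dom_char_cases {c : Char} (h : pvDomChar c = true) :
    (32 ≤ c.toNat ∧ c.toNat ≤ 126) ∨ c.toNat = 9 ∨ c.toNat = 10 ∨ c.toNat = 13 := by
  simp only [pvDomChar, Bool.or_eq_true, Bool.and_eq_true, decide_eq_true_eq, beq_iff_eq] at h
  tauto

-- characters produced by pteNorm on a Dom character are printable ASCII (32..126)
lemma pteNorm_dom {c : Char} (h : pvDomChar c = true) :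
    32 ≤ (pteNorm c).toNat ∧ (pteNorm c).toNat ≤ 126 := by
  have h := dom_char_cases h
  by_cases hn : c = '\n' ∨ c = '\r' ∨ c = '\t'
  · have he : pteNorm c = ' ' := by simp [pteNorm, hn]
    rw [he]; decide
  · have he : pteNorm c = c := by simp [pteNorm, hn]
    rw [he]
    rcases h with h | h | h | h
    · exact h
    · exact absurd (char_toNat_inj (show c.toNat = ('\t' : Char).toNat from h)) (by tauto)
    · exact absurd (char_toNat_inj (show c.toNat = ('\n' : Char).toNat from h)) (by tauto)
    · exact absurd (char_toNat_inj (show c.toNat = ('\r' : Char).toNat from h)) (by tauto)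

-- on printable ASCII, isspace ↔ the char is ' '
lemma isspace_printable {c : Char} (h1 : 32 ≤ c.toNat) (h2 : c.toNat ≤ 126) :
    PySem.Chars.isspace c = (c == ' ') := by
  by_cases hc : c = ' '
  · subst hc; decide
  · have h32 : c.toNat ≠ 32 := by
      intro h; exact hc (char_toNat_inj (show c.toNat = (' ' : Char).toNat from h))
    have hb : (c == ' ') = false := by simp [hc]
    rw [hb]
    simp only [PySem.Chars.isspace]
    simp only [Bool.or_eq_false_iff, Bool.and_eq_false_iff, decide_eq_false_iff_not]
    omega

lemma isws_printable {c : Char} (h1 : 32 ≤ c.toNat) (h2 : c.toNat ≤ 126) :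
    pteB_isws c = (c == ' ') := by
  by_cases hc : c = ' '
  · subst hc; decide
  · have hne : ∀ (d : Char), c.toNat ≠ d.toNat → (c == d) = false := by
      intro d h
      simp only [beq_eq_false_iff_ne, ne_eq]
      intro he; exact h (by rw [he])
    have h32 : c.toNat ≠ 32 := by
      intro h; exact hc (char_toNat_inj (show c.toNat = (' ' : Char).toNat from h))
    simp only [pteB_isws]
    rw [hne ' ' (by simpa using h32), hne '\t' (by intro h; rw [h] at h1; simp at h1),
        hne '\n' (by intro h; rw [h] at h1; simp at h1),
        hne '\r' (by intro h; rw [h] at h1; simp at h1),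
        hne '\x0c' (by intro h; rw [h] at h1; simp at h1),
        hne '\x0b' (by intro h; rw [h] at h1; simp at h1)]
    simp [beq_iff_eq, hc]

-- pteB_go sees  Dom characters exactly as their pteNorm images
lemma pteB_go_map (cs : List Char) : ∀ (out : List Char) (p : Bool),
    (∀ c ∈ cs, pvDomChar c = true) →
    pteB_go cs out p = pteB_go (cs.map pteNorm) out p := by
  induction cs with
  | nil => intro out p _; rfl
  | cons c t ih =>
    intro out p h
    have hc := h c (by simp)
    have htl : ∀ c ∈ t, pvDomChar c = true := fun x hx => h x (by simp [hx])
    by_cases hn : c = '\n' ∨ c = '\r' ∨ c = '\t'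
    · have h1 : pteB_isws c = true := by
        rcases hn with h | h | h <;> subst h <;> decide
      have hlt : ¬ 128 ≤ c.toNat := by
        rcases hn with h | h | h <;> subst h <;> decide
      simp only [List.map_cons, pteB_go, pteNorm, hn, if_true, hlt, if_false, h1]
      have h2 : ¬ 128 ≤ (' ' : Char).toNat := by decide
      have h3 : pteB_isws ' ' = true := by decide
      simp only [h2, if_false, h3, if_true]
      exact ih out true htl
    · have hmap : pteNorm c = c := by simp [pteNorm, hn]
      simp only [List.map_cons, hmap, pteB_go]
      split
      · exact ih out p htl
      · split
        · exact ih out true htl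
        · exact ih _ false htl

-- intercalate bookkeeping
lemma ij_cons (x y : List Char) (zs : List (List Char)) :
    List.intercalate [' '] (x :: y :: zs) = x ++ ' ' :: List.intercalate [' '] (y :: zs) := by
  simp [List.intercalate, List.intersperse]

lemma ij_append_last : ∀ (xs : List (List Char)) (w : List Char) (c : Char),
    List.intercalate [' '] (xs ++ [w ++ [c]]) = List.intercalate [' '] (xs ++ [w]) ++ [c] := by
  intro xs
  induction xs with
  | nil => intro w c; simp [List.intercalate]
  | cons x t ih =>
    intro w c
    cases t with
    | nil => simp [ij_cons, List.intercalate]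
    | cons y u =>
      have h1 : (x :: y :: u) ++ [w ++ [c]] = x :: y :: (u ++ [w ++ [c]]) := by simp
      have h2 : (x :: y :: u) ++ [w] = x :: y :: (u ++ [w]) := by simp
      rw [h1, h2, ij_cons, ij_cons]
      have h3 : y :: (u ++ [w ++ [c]]) = (y :: u) ++ [w ++ [c]] := by simp
      have h4 : y :: (u ++ [w]) = (y :: u) ++ [w] := by simp
      rw [h3, h4, ih]
      simp

lemma ij_append_new : ∀ (xs : List (List Char)) (c : Char),
    List.intercalate [' '] (xs ++ [[c]])
      = (if xs.isEmpty then [] else List.intercalate [' '] xs ++ [' ']) ++ [c] := by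
  intro xs
  induction xs with
  | nil => intro c; simp [List.intercalate]
  | cons x t ih =>
    intro c
    cases t with
    | nil => simp [ij_cons, List.intercalate]
    | cons y u =>
      have h1 : (x :: y :: u) ++ [[c]] = x :: y :: (u ++ [[c]]) := by simp
      rw [h1, ij_cons]
      have h3 : y :: (u ++ [[c]]) = (y :: u) ++ [[c]] := by simp
      rw [h3, ih]
      simp [ij_cons]

lemma ij_nil_iff : ∀ (xs : List (List Char)), (∀ w ∈ xs, w ≠ []) →
    (List.intercalate [' '] xs = [] ↔ xs = []) := by
  intro xs h
  cases xs with
  | nil => simp [List.intercalate]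
  | cons x t =>
    cases t with
    | nil =>
      simp [List.intercalate]
      exact h x (by simp)
    | cons y u =>
      rw [ij_cons]
      constructor
      · intro he
        exact absurd (List.append_eq_nil_iff.mp he).1 (h x (by simp))
      · intro he; simp at he

-- the core correspondence: B's single loop computes ' '.join(s.split()) incrementally
lemma core : ∀ (rest cur : List Char) (acc : List (List Char)) (pending : Bool),
    (∀ c ∈ rest, 32 ≤ c.toNat ∧ c.toNat ≤ 126) →
    (pending = true → cur = []) →
    (pending = false → cur ≠ [] ∨ acc = []) →
    (∀ w ∈ acc, w ≠ []) →
    pteB_go rest (List.intercalate [' ']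
        (acc.reverse ++ if cur.isEmpty then [] else [cur.reverse])) pending
      = List.intercalate [' '] (PySem.Chars.split₀.go rest cur acc)
  | [], cur, acc, pending, _, _, _, _ => by
    by_cases hc : cur = []
    · simp [pteB_go, PySem.Chars.split₀.go, hc]
    · simp [pteB_go, PySem.Chars.split₀.go, hc]
  | c :: t, cur, acc, pending, hdom, hp, hnp, hacc => by
    have hc := hdom c (by simp)
    have htl : ∀ x ∈ t, 32 ≤ x.toNat ∧ x.toNat ≤ 126 := fun x hx => hdom x (by simp [hx])
    have h128 : ¬ 128 ≤ c.toNat := by omega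
    have hsp := isspace_printable hc.1 hc.2
    have hws := isws_printable hc.1 hc.2
    by_cases hce : c = ' '
    · -- whitespace step
      subst hce
      have h1 : pteB_isws ' ' = true := by decide
      have h2 : PySem.Chars.isspace ' ' = true := by decide
      simp only [pteB_go, h128, if_false, h1, if_true, PySem.Chars.split₀.go, h2]
      by_cases hcur : cur = []
      · simp only [hcur, List.isEmpty_nil, if_true]
        have := core t [] acc true htl (fun _ => rfl) (by simp) hacc
        simpa [List.isEmpty_nil] using this
      · have hcur' : cur.isEmpty = false := by simp [hcur]
        simp only [hcur', Bool.false_eq_true, if_false]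
        have := core t [] (cur.reverse :: acc) true htl (fun _ => rfl) (by simp)
          (by intro w hw
              rcases List.mem_cons.mp hw with h | h
              · subst h; simpa using hcur
              · exact hacc w h)
        simpa [List.isEmpty_nil] using this
    · -- kept character step
      have h1 : pteB_isws c = false := by rw [hws]; simp [hce]
      have h2 : PySem.Chars.isspace c = false := by rw [hsp]; simp [hce]
      simp only [pteB_go, h128, if_false, h1, PySem.Chars.split₀.go, h2]
      cases pending with
      | true =>
        have hcur : cur = [] := hp rfl
        subst hcur
        simp only [List.isEmpty_nil, if_true, List.append_nil, Bool.true_and]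
        have hstep := ij_append_new acc.reverse c
        by_cases ha : acc = []
        · subst ha
          simp only [List.reverse_nil, List.intercalate, List.isEmpty_nil, Bool.not_true,
            Bool.false_eq_true, if_false]
          have := core t [c] [] false htl (by simp) (by simp) (by simp)
          simp only [List.isEmpty_cons, Bool.false_eq_true, if_false, List.reverse_cons, List.reverse_nil,
            List.nil_append] at this
          simpa [List.intercalate] using this
        · have hia : (List.intercalate [' '] acc.reverse) ≠ [] := by
            rw [ne_eq, ij_nil_iff acc.reverse (by intro w hw; exact hacc w (List.mem_reverse.mp hw))]
            simpa using ha
          have hne : (List.intercalate [' '] acc.reverse).isEmpty = false := by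
            simpa [List.isEmpty_iff] using hia
          simp only [hne, Bool.not_false, if_true]
          have := core t [c] acc false htl (by simp) (by simp) hacc
          simp only [List.isEmpty_cons, Bool.false_eq_true, if_false, List.reverse_cons, List.reverse_nil,
            List.nil_append] at this
          rw [hstep] at this
          have hacc' : acc.reverse.isEmpty = false := by simpa [List.isEmpty_iff] using ha
          simpa [hacc'] using this
      | false =>
        rcases hnp rfl with hcur | ha
        · -- cur ≠ []: extend the current word
          have hcur' : cur.isEmpty = false := by simp [hcur]
          simp only [hcur', Bool.false_and, Bool.false_eq_true, if_false]
          have := core t (c :: cur) acc false htl (by simp) (by simp) hacc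
          simp only [List.isEmpty_cons, Bool.false_eq_true, if_false, List.reverse_cons] at this
          rw [← this]
          congr 1
          exact (ij_append_last acc.reverse cur.reverse c).symm
        · -- acc = []
          subst ha
          by_cases hcur : cur = []
          · subst hcur
            simp only [List.reverse_nil, List.isEmpty_nil, if_true, List.append_nil,
              List.intercalate, Bool.false_and, if_false]
            have := core t [c] [] false htl (by simp) (by simp) (by simp)
            simp only [List.isEmpty_cons, Bool.false_eq_true, if_false, List.reverse_cons, List.reverse_nil,
              List.nil_append] at this
            simpa [List.intercalate] using this
          · have hcur' : cur.isEmpty = false := by simp [hcur]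
            simp only [hcur', Bool.false_and, Bool.false_eq_true, if_false]
            have := core t (c :: cur) [] false htl (by simp) (by simp) (by simp)
            simp only [List.isEmpty_cons, Bool.false_eq_true, if_false, List.reverse_cons] at this
            rw [← this]
            congr 1
            exact (ij_append_last ([] : List (List Char)).reverse cur.reverse c).symm

-- once the output is nonempty its head never changes
lemma pteB_go_head_ne_nil (rest : List Char) : ∀ (out : List Char) (p : Bool), out ≠ [] →
    (pteB_go rest out p).head? = out.head? := by
  induction rest with
  | nil => intro out p _; rfl
  | cons c t ih =>
    intro out p hout
    simp only [pteB_go]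
    split
    · exact ih out p hout
    · split
      · exact ih out true hout
      · cases out with
        | nil => exact absurd rfl hout
        | cons a b =>
          split
          · rw [ih _ false (by simp)]; simp
          · rw [ih _ false (by simp)]; simp

-- the loop output is empty or starts with a non-space character
lemma pteB_go_nil_head (rest : List Char) : ∀ (p : Bool),
    (∀ c ∈ rest, pvDomChar c = true) →
    pteB_go rest [] p = [] ∨
      ∃ c tl, pteB_go rest [] p = c :: tl ∧ PySem.Chars.isspace c = false := by
  induction rest with
  | nil => intro p _; left; rfl
  | cons c t ih =>
    intro p h
    have hc := h c (by simp)
    have htl : ∀ x ∈ t, pvDomChar x = true := fun x hx => h x (by simp [hx])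
    have hlt : ¬ 128 ≤ c.toNat := by rcases dom_char_cases hc with h | h | h | h <;> omega
    simp only [pteB_go, hlt, if_false]
    by_cases hws : pteB_isws c = true
    · simp only [hws, if_true]
      exact ih true htl
    · simp only [hws, Bool.and_false, if_false]
      right
      have hsp : PySem.Chars.isspace c = false := by
        have hc := dom_char_cases hc
        have hws' : c ≠ ' ' ∧ c ≠ '\t' ∧ c ≠ '\n' ∧ c ≠ '\r' ∧ c ≠ '\x0c' ∧ c ≠ '\x0b' := by
          constructor
          · intro he; subst he; simp [pteB_isws] at hws
          constructor
          · intro he; subst he; simp [pteB_isws] at hws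
          constructor
          · intro he; subst he; simp [pteB_isws] at hws
          constructor
          · intro he; subst he; simp [pteB_isws] at hws
          constructor
          · intro he; subst he; simp [pteB_isws] at hws
          · intro he; subst he; simp [pteB_isws] at hws
        obtain ⟨hspc, htb, hnl, hcr, hff, hvt⟩ := hws'
        rcases hc with hcc | hcc | hcc | hcc
        · rw [isspace_printable hcc.1 hcc.2]
          simpa using hspc
        · exact absurd (char_toNat_inj (show c.toNat = ('\t' : Char).toNat from hcc)) htb
        · exact absurd (char_toNat_inj (show c.toNat = ('\n' : Char).toNat from hcc)) hnl
        · exact absurd (char_toNat_inj (show c.toNat = ('\r' : Char).toNat from hcc)) hcr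
      have hhd := pteB_go_head_ne_nil t ((if p && !([] : List Char).isEmpty then ([] : List Char) ++ [' ', c] else ([] : List Char) ++ [c])) false (by split <;> simp)
      refine ⟨c, (pteB_go t (if p && !([] : List Char).isEmpty then ([] : List Char) ++ [' ', c] else ([] : List Char) ++ [c]) false).tail, ?_, hsp⟩
      have hout : (if p && !([] : List Char).isEmpty then ([] : List Char) ++ [' ', c] else ([] : List Char) ++ [c]) = [c] := by simp
      rw [hout] at hhd ⊢
      have hne : pteB_go t [c] false ≠ [] := by
        intro he; rw [he] at hhd; simp at hhd
      rcases List.exists_cons_of_ne_nil hne with ⟨a, b, hab⟩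
      rw [hab] at hhd ⊢
      simp only [List.head?_cons] at hhd
      simp at hhd
      simp [hhd]

-- a list whose head is non-space strips to a nonempty list
lemma strip_ne_nil {c : Char} {tl : List Char} (h : PySem.Chars.isspace c = false) :
    PySem.Chars.strip (c :: tl) ≠ [] := by
  simp only [PySem.Chars.strip, PySem.Chars.lstrip, PySem.Chars.rstrip]
  rw [List.dropWhile_cons_of_neg (by simp [h])]
  intro he
  have h2 := List.reverse_eq_nil_iff.mp he
  rw [List.dropWhile_eq_nil_iff] at h2
  have h3 := h2 c (by simp)
  rw [h] at h3
  exact absurd h3 (by simp)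

-- truncation: A's conditional slice is B's unconditional take
lemma trunc_eq (s : String) :
    (if PySem.Str.len s > 8000 then PySem.Str.slice s none (some 8000) else s).toList
      = s.toList.take 8000 := by
  by_cases h : PySem.Str.len s > 8000
  · rw [if_pos h]
    rw [PySem.Str.len_eq] at h
    have hlen : 8000 < s.toList.length := by exact_mod_cast h
    rw [PySem.Str.toList_slice]
    simp only [PySem.Chars.slice_eq_listSlice, PySem.List.slice, PySem.List.clampIdx]
    norm_num
    omega
  · rw [if_neg h]
    rw [PySem.Str.len_eq] at h
    have hlen : s.toList.length ≤ 8000 := by omega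
    exact (List.take_of_length_le hlen).symm

-- ===== VERDICT (by name: the statement is the Claim_ definition above) =====
theorem prepare_text_for_embedding_spec : Claim_equal_prepare_text_for_embedding := by
  intro text hdom
  unfold Spec_prepare_text_for_embedding
  have hdom' : ∀ c ∈ text.toList, pvDomChar c = true := by
    intro c hc
    have h0 : pvDomStr text = true := hdom
    exact List.all_eq_true.mp (by simpa [pvDomStr] using h0) c hc
  have hds : ∀ c ∈ text.toList.map pteNorm, 32 ≤ c.toNat ∧ c.toNat ≤ 126 := by
    intro c hc
    rcases List.mem_map.mp hc with ⟨d, hd, rfl⟩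
    exact pteNorm_dom (hdom' d hd)
  -- B's loop output equals A's join-of-split
  have hB : pteB_go text.toList [] false
      = List.intercalate [' '] (PySem.Chars.split₀.go (text.toList.map pteNorm) [] []) := by
    rw [pteB_go_map text.toList [] false hdom']
    have := core (text.toList.map pteNorm) [] [] false hds (fun _ => rfl) (fun _ => Or.inr rfl) (by simp)
    simpa using this
  have hjoin : (PySem.Str.join " " (PySem.Str.split₀
      (String.ofList (((PySem.Str.replace (PySem.Str.replace (PySem.Str.replace text "\n" " ") "\r" " ") "\t" " ").toList).filter (fun c => decide (c.toNat < 128)))))).toList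
      = pteB_go text.toList [] false := by
    have hrep : (PySem.Str.replace (PySem.Str.replace (PySem.Str.replace text "\n" " ") "\r" " ") "\t" " ").toList
        = text.toList.map pteNorm := by
      rw [PySem.Str.toList_replace, PySem.Str.toList_replace, PySem.Str.toList_replace]
      have h1 : ("\n" : String).toList = ['\n'] := by decide
      have h2 : ("\r" : String).toList = ['\r'] := by decide
      have h3 : ("\t" : String).toList = ['\t'] := by decide
      have h4 : (" " : String).toList = [' '] := by decide
      rw [h1, h2, h3, h4]
      exact three_replaces text.toList
    have hfilter : (text.toList.map pteNorm).filter (fun c => decide (c.toNat < 128))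
        = text.toList.map pteNorm := by
      apply List.filter_eq_self.mpr
      intro c hc
      have := hds c hc
      simp; omega
    rw [PySem.Str.toList_join, PySem.Str.split₀_map_toList, String.toList_ofList, hrep, hfilter, hB]
    rw [String.toList_ofList]
    rfl
  simp only [prepare_text_for_embedding, prepare_text_for_embedding_alt]
  have ht4 : (if PySem.Str.len (PySem.Str.join " " (PySem.Str.split₀
      (String.ofList (((PySem.Str.replace (PySem.Str.replace (PySem.Str.replace text "\n" " ") "\r" " ") "\t" " ").toList).filter (fun c => decide (c.toNat < 128)))))) > 8000
      then PySem.Str.slice (PySem.Str.join " " (PySem.Str.split₀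
      (String.ofList (((PySem.Str.replace (PySem.Str.replace (PySem.Str.replace text "\n" " ") "\r" " ") "\t" " ").toList).filter (fun c => decide (c.toNat < 128)))))) none (some 8000)
      else PySem.Str.join " " (PySem.Str.split₀
      (String.ofList (((PySem.Str.replace (PySem.Str.replace (PySem.Str.replace text "\n" " ") "\r" " ") "\t" " ").toList).filter (fun c => decide (c.toNat < 128)))))).toList
      = (pteB_go text.toList [] false).take 8000 := by
    rw [trunc_eq, hjoin]
  generalize hT : (if PySem.Str.len (PySem.Str.join " " (PySem.Str.split₀
      (String.ofList (((PySem.Str.replace (PySem.Str.replace (PySem.Str.replace text "\n" " ") "\r" " ") "\t" " ").toList).filter (fun c => decide (c.toNat < 128)))))) > 8000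
      then _ else _) = T at ht4 ⊢
  have hcl : String.ofList ((pteB_go text.toList [] false).take 8000) = T := by
    apply String.toList_inj.mp
    rw [String.toList_ofList, ht4]
  rw [hcl]
  rcases pteB_go_nil_head text.toList false hdom' with hJ | ⟨c, tl, hJ, hcsp⟩
  · -- loop output empty: both sides return "empty_document"
    have hT0 : T = "" := by
      rw [← hcl, hJ]
      rfl
    have hs : PySem.Str.strip T = "" := by
      rw [hT0]
      decide
    rw [hs, hT0]
  · -- loop output starts with a non-space char: neither side is empty
    have hTlist : T.toList = c :: tl.take 7999 := by
      rw [ht4, hJ]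
      show List.take (7999 + 1) (c :: tl) = _
      rw [List.take_succ_cons]
    have hTne : T ≠ "" := by
      intro he
      rw [he] at hTlist
      simp at hTlist
    have hstrip : PySem.Str.strip T ≠ "" := by
      intro he
      have h5 : (PySem.Str.strip T).toList = [] := by rw [he]; rfl
      rw [PySem.Str.toList_strip, hTlist] at h5
      exact strip_ne_nil hcsp h5
    rw [if_neg hstrip, if_neg hTne]
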